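-- pv_equiv track=rewrite | github.com/keniack/beaver | beaver.py | group_by_title
-- ===== SOURCE A (Python) =====
-- def group_by_title(entries):
--     grouped = {}
--     for entry in entries:
--         title = entry.get("title", "").strip().lower()
--         if not title:
--             continue
--         grouped.setdefault(title, []).append(entry)
--     return grouped
-- ===== SOURCE B (Python) =====
-- def group_by_title(entries):
--     entries = list(entries)
--     keys = [e.get("title", "").strip().lower() for e in entries]
--     order = []
--     for k in keys:
--         if k and k not in order:
--             order.append(k)
--     return {k: [e for e, kk in zip(entries, keys) if kk == k] for k in order}
-- ===== Notes on version B (the rewrite author's own statement) =====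
-- stated objective: alternative
-- what changed: Replaced the single-pass dict-mutation (setdefault/append) with a key-precomputation pass, a first-occurrence order list, and one comprehension per distinct key that filters zip(entries, keys).
import Mathlib
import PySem

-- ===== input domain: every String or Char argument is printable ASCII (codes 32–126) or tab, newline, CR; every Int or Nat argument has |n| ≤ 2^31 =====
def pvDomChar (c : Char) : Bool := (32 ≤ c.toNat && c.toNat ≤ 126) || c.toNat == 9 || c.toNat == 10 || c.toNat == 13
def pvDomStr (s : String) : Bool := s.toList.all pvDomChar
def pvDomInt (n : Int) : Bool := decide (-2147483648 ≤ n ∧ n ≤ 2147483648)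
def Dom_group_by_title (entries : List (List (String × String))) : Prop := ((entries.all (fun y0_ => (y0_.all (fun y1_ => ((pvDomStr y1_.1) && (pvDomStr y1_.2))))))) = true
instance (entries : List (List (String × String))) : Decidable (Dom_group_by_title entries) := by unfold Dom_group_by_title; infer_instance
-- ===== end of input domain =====

-- B replaces A's single-pass dict mutation (setdefault/append) by a key-precomputation pass,
-- a first-occurrence order list and one filtering comprehension per distinct key (alternative decomposition).

-- shared helper: entry.get("title", "").strip().lower()
def titleOf (entry : List (String × String)) : String :=
  PySem.Str.lower (PySem.Str.strip (PySem.Dict.getD (PySem.Dict.mk entry) "title" ""))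

-- ===== PORT A =====
def group_by_title (entries : List (List (String × String))) : List (String × List (List (String × String))) :=
  (entries.foldl
    (fun grouped entry =>
      let title := titleOf entry
      if title = "" then grouped
      else grouped.modify title [] (fun v => v ++ [entry]))
    (PySem.Dict.empty : PySem.Dict String (List (List (String × String))))).items

-- ===== PORT B =====
def group_by_title_alt (entries : List (List (String × String))) : List (String × List (List (String × String))) :=
  let keys := entries.map titleOf
  let order := keys.foldl (fun s k => if k ≠ "" ∧ k ∉ s then s ++ [k] else s) ([] : List String)
  order.map (fun k => (k, ((entries.zip keys).filter (fun p => p.2 == k)).map (fun p => p.1)))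

-- ===== PRECONDITION & SPEC =====
def Spec_group_by_title (entries : List (List (String × String))) (out : List (String × List (List (String × String)))) : Prop := out = group_by_title_alt entries
instance (entries : List (List (String × String))) (out : List (String × List (List (String × String)))) : Decidable (Spec_group_by_title entries out) := by unfold Spec_group_by_title; infer_instance

-- ===== CLAIM (what is proved, stated in full; the proofs are below) =====
def Claim_equal_group_by_title : Prop := ∀ (entries : List (List (String × String))), Dom_group_by_title entries → Spec_group_by_title entries (group_by_title entries)

-- ===== LEMMAS AND PROOFS =====

-- B's per-key comprehension over zip(entries, keys) is a plain filter of entries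
theorem zip_filter_map (es : List (List (String × String))) (k : String) :
    ((es.zip (es.map titleOf)).filter (fun p => p.2 == k)).map (fun p => p.1)
      = es.filter (fun e => titleOf e == k) := by
  induction es with
  | nil => rfl
  | cons e rest ih =>
      by_cases h : titleOf e == k <;> simp [List.filter, h, ih]

-- B's order loop is ordered dedup of the nonempty keys
theorem order_foldl_eq (l : List String) (s : List String) :
    l.foldl (fun s k => if k ≠ "" ∧ k ∉ s then s ++ [k] else s) s
      = PySem.Set.update s (l.filter (fun k => k ≠ "")) := by
  induction l generalizing s with
  | nil => simp [PySem.Set.update]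
  | cons k rest ih =>
      by_cases hk : k = ""
      · simp [hk, List.filter, ih]
      · rw [List.foldl_cons, ih]
        simp only [List.filter_cons]
        have hd : (decide ¬k = "") = true := by simp [hk]
        rw [hd, if_pos rfl, PySem.Set.update_cons]
        congr 1
        by_cases hm : k ∈ s <;> simp [PySem.Set.add, hk, hm]

-- A's loop skips empty titles: it is the modify-fold over the nonempty-title entries
theorem dict_fold_filter (es : List (List (String × String)))
    (d : PySem.Dict String (List (List (String × String)))) :
    es.foldl
      (fun grouped entry =>
        if titleOf entry = "" then grouped
        else grouped.modify (titleOf entry) [] (fun v => v ++ [entry])) d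
      = (es.filter (fun e => titleOf e ≠ "")).foldl
          (fun grouped entry => grouped.modify (titleOf entry) [] (fun v => v ++ [entry])) d := by
  induction es generalizing d with
  | nil => simp only [List.filter_nil, List.foldl_nil]
  | cons e rest ih =>
      rw [List.foldl_cons, List.filter_cons]
      by_cases h : titleOf e = ""
      · rw [if_pos h]
        have hd : (decide ¬titleOf e = "") = false := by simp [h]
        rw [hd, if_neg (by simp)]
        exact ih d
      · rw [if_neg h]
        have hd : (decide ¬titleOf e = "") = true := by simp [h]
        rw [hd, if_pos rfl, List.foldl_cons]
        exact ih _

theorem keys_part (l : List (List (String × String))) :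
    (l.foldl (fun g e => g.modify (titleOf e) [] (fun v => v ++ [e]))
        (PySem.Dict.empty : PySem.Dict String (List (List (String × String))))).keys
      = PySem.Set.ofList (l.map titleOf) := by
  rw [PySem.Dict.keys_foldl_modify_key]
  rw [PySem.Dict.keys_empty, PySem.Set.update_nil_left]

theorem nodup_part (l : List (List (String × String))) :
    (l.foldl (fun g e => g.modify (titleOf e) [] (fun v => v ++ [e]))
        (PySem.Dict.empty : PySem.Dict String (List (List (String × String))))).keys.Nodup := by
  exact PySem.Dict.nodup_keys_foldl_modify_key _ _ _ _ _ PySem.Dict.nodup_keys_empty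

theorem getD_part (l : List (List (String × String))) (k : String) :
    (l.foldl (fun g e => g.modify (titleOf e) [] (fun v => v ++ [e]))
        (PySem.Dict.empty : PySem.Dict String (List (List (String × String))))).getD k []
      = l.filter (fun e => titleOf e == k) := by
  have h := List.foldl_map (f := fun e : List (String × String) => (titleOf e, e))
      (g := fun (g : PySem.Dict String (List (List (String × String)))) p => g.modify p.1 [] (fun v => v ++ [p.2]))
      (l := l) (init := (PySem.Dict.empty : PySem.Dict String (List (List (String × String)))))
  rw [← h]
  rw [PySem.Dict.getD_foldl_modify_append]
  rw [PySem.Dict.getD_empty, List.nil_append]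
  rw [List.filter_map, List.map_map]
  simp only [Function.comp_def, List.map_id']

-- the filtered entries' titles are the nonempty titles
theorem filtered_titles (es : List (List (String × String))) :
    (es.filter (fun e => titleOf e ≠ "")).map titleOf
      = (es.map titleOf).filter (fun k => k ≠ "") := by
  rw [List.filter_map]
  simp only [Function.comp_def]

-- filtering twice collapses once k is known nonempty
theorem filter_collapse (es : List (List (String × String))) (k : String) (hk : k ≠ "") :
    (es.filter (fun e => titleOf e ≠ "")).filter (fun e => titleOf e == k)
      = es.filter (fun e => titleOf e == k) := by
  rw [List.filter_filter]
  refine List.filter_congr (fun e _ => ?_)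
  by_cases h : titleOf e = k
  · simp [h, hk]
  · simp [h]

-- common normal form: both programs compute this map over the deduped nonempty titles
theorem canonical (es : List (List (String × String))) :
    group_by_title es
      = (PySem.Set.ofList ((es.map titleOf).filter (fun k => k ≠ ""))).map
          (fun k => (k, es.filter (fun e => titleOf e == k))) := by
  unfold group_by_title
  show (es.foldl
      (fun grouped entry =>
        if titleOf entry = "" then grouped
        else grouped.modify (titleOf entry) [] (fun v => v ++ [entry]))
      (PySem.Dict.empty : PySem.Dict String (List (List (String × String))))).items = _
  rw [dict_fold_filter]
  rw [PySem.Dict.items_eq_map_keys _ (nodup_part _) []]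
  rw [keys_part, filtered_titles]
  refine List.map_congr_left (fun k hk => ?_)
  have hk' : k ≠ "" := by
    have := (PySem.Set.mem_ofList _ _).mp hk
    simpa using (List.mem_filter.mp this).2
  rw [getD_part, filter_collapse _ _ hk']

theorem alt_canonical (es : List (List (String × String))) :
    group_by_title_alt es
      = (PySem.Set.ofList ((es.map titleOf).filter (fun k => k ≠ ""))).map
          (fun k => (k, es.filter (fun e => titleOf e == k))) := by
  unfold group_by_title_alt
  simp only [order_foldl_eq, PySem.Set.update_nil_left, zip_filter_map]

-- ===== VERDICT (by name: the statement is the Claim_ definition above) =====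
theorem group_by_title_spec : Claim_equal_group_by_title := by
  intro entries _
  unfold Spec_group_by_title
  rw [canonical, alt_canonical]
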